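-- pv_equiv track=rewrite | github.com/sakura-love/desktop-icon-organizer-master | desktop_overlay.py | _is_overlay_cmdline
-- ===== SOURCE A (Python) =====
-- def _is_overlay_cmdline(cmdline) -> bool:
--     if not cmdline:
--         return False
--     lowered = [str(arg).lower() for arg in cmdline]
--     if any("overlay_process.py" in arg for arg in lowered):
--         return True
--     if "--overlay" in lowered:
--         return True
--     if "--autostart" in lowered:
--         return True
--     return False
-- ===== SOURCE B (Python) =====
-- def _is_overlay_cmdline(cmdline) -> bool:
--     # Different algorithm: flatten the whole command line into ONE NUL-delimited
--     # text (arguments never contain NUL) and answer with three substring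
--     # searches on it: a bare pattern for the script-name substring test, and
--     # NUL-wrapped patterns so the two flag tests are exact whole-argument
--     # matches.  An empty cmdline yields the text "\x00\x00", which matches none.
--     text = "\x00" + "\x00".join(str(arg).lower() for arg in cmdline) + "\x00"
--     return ("overlay_process.py" in text
--             or "\x00--overlay\x00" in text
--             or "\x00--autostart\x00" in text)
-- ===== Notes on version B (the rewrite author's own statement) =====
-- stated objective: alternative
-- what changed: Instead of lowering each argument and scanning the list three ways (any-substring plus two list membership tests), B flattens the lowered command line into a single NUL-delimited string and decides with three substring searches, encoding the exact flag matches as NUL-wrapped patterns.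
import Mathlib
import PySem

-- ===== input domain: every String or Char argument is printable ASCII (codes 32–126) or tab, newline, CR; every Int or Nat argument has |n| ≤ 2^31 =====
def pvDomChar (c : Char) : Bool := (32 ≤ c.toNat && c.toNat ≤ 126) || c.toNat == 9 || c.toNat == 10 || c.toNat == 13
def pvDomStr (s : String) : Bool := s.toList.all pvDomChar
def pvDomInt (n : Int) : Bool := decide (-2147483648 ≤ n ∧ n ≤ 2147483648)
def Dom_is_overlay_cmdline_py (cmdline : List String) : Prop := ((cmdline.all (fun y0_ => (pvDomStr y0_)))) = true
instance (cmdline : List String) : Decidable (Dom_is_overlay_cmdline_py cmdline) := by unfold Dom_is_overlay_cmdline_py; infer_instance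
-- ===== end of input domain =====

-- B replaces A's lowered list and three list scans by one NUL-delimited joined string searched for
-- three patterns (flags encoded as NUL-wrapped patterns); exact on the NUL-free domain (objective: alternative).


-- ===== PORT A =====
-- A: guard, build the lowered list, then three scans (substring any, two equality memberships)
def is_overlay_cmdline_py (cmdline : List String) : Bool :=
  if cmdline.isEmpty then false
  else
    let lowered := cmdline.map (fun arg => PySem.Str.lower arg)
    if lowered.any (fun arg => PySem.Str.isIn "overlay_process.py" arg) then true
    else if lowered.contains "--overlay" then true
    else if lowered.contains "--autostart" then true
    else false

-- ===== PORT B =====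
-- B: one NUL-delimited joined text, three substring searches (flags as NUL-wrapped patterns)
def is_overlay_cmdline_py_alt (cmdline : List String) : Bool :=
  let text := "\x00" ++ PySem.Str.join "\x00" (cmdline.map (fun arg => PySem.Str.lower arg)) ++ "\x00"
  PySem.Str.isIn "overlay_process.py" text ||
    PySem.Str.isIn "\x00--overlay\x00" text ||
    PySem.Str.isIn "\x00--autostart\x00" text

-- ===== PRECONDITION & SPEC =====
def Spec_is_overlay_cmdline_py (cmdline : List String) (out : Bool) : Prop := out = is_overlay_cmdline_py_alt cmdline
instance (cmdline : List String) (out : Bool) : Decidable (Spec_is_overlay_cmdline_py cmdline out) := by unfold Spec_is_overlay_cmdline_py; infer_instance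

-- ===== CLAIM (what is proved, stated in full; the proofs are below) =====
def Claim_equal_is_overlay_cmdline_py : Prop := ∀ (cmdline : List String), Dom_is_overlay_cmdline_py cmdline → Spec_is_overlay_cmdline_py cmdline (is_overlay_cmdline_py cmdline)

-- ===== LEMMAS AND PROOFS =====

-- a pattern avoiding `c` is a prefix of `u ++ c :: v` iff it is a prefix of `u`
lemma prefix_cross {α : Type} (c : α) (p u v : List α) :
    c ∉ p → (p <+: u ++ c :: v ↔ p <+: u) := by
  induction p generalizing u with
  | nil => intro _; simp
  | cons a p ih =>
    intro hc
    cases u with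
    | nil =>
      constructor
      · intro h
        rcases List.cons_prefix_cons.mp h with ⟨rfl, -⟩
        exact absurd List.mem_cons_self hc
      · intro h
        exact absurd (List.prefix_nil.mp h) (List.cons_ne_nil _ _)
    | cons b u =>
      rw [List.cons_append, List.cons_prefix_cons, List.cons_prefix_cons]
      exact and_congr_right fun _ => ih u (fun h => hc (List.mem_cons_of_mem _ h))

-- a pattern avoiding `c` is an infix of `u ++ c :: v` iff it occurs in `u` or in `v`
lemma infix_cross {α : Type} (c : α) (p u v : List α) (hc : c ∉ p) :
    p <:+: u ++ c :: v ↔ p <:+: u ∨ p <:+: v := by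
  induction u with
  | nil =>
    rw [List.nil_append, List.infix_cons_iff]
    constructor
    · rintro (hp | h)
      · cases p with
        | nil => exact Or.inl (List.nil_infix)
        | cons a p =>
          rcases List.cons_prefix_cons.mp hp with ⟨rfl, -⟩
          exact absurd List.mem_cons_self hc
      · exact Or.inr h
    · rintro (hp | h)
      · rw [List.infix_nil] at hp; subst hp; exact Or.inl (List.nil_prefix)
      · exact Or.inr h
  | cons b u ih =>
    rw [List.cons_append, List.infix_cons_iff, ih, List.infix_cons_iff (l₂ := u)]
    rw [show b :: (u ++ c :: v) = (b :: u) ++ c :: v from rfl, prefix_cross c p (b :: u) v hc]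
    tauto

-- `q ++ c :: w` is a prefix of `a ++ c :: z` iff `q = a` and `w <+: z`, when neither q nor a contains c
lemma eq_prefix_cross {α : Type} (c : α) (q : List α) :
    ∀ (a : List α) (w z : List α), c ∉ q → c ∉ a →
      (q ++ c :: w <+: a ++ c :: z ↔ q = a ∧ w <+: z) := by
  induction q with
  | nil =>
    rintro (_ | ⟨b, a⟩) w z hq ha
    · simp
    · rw [List.nil_append, List.cons_append, List.cons_prefix_cons]
      constructor
      · rintro ⟨rfl, -⟩
        exact absurd List.mem_cons_self ha
      · rintro ⟨h, -⟩
        exact absurd h.symm (List.cons_ne_nil _ _)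
  | cons x q ih =>
    rintro (_ | ⟨b, a⟩) w z hq ha
    · rw [List.cons_append, List.nil_append, List.cons_prefix_cons]
      constructor
      · rintro ⟨rfl, -⟩
        exact absurd List.mem_cons_self hq
      · rintro ⟨h, -⟩
        exact absurd h (List.cons_ne_nil _ _)
    · rw [List.cons_append, List.cons_append, List.cons_prefix_cons,
        ih a w z (fun h => hq (List.mem_cons_of_mem _ h)) (fun h => ha (List.mem_cons_of_mem _ h))]
      constructor
      · rintro ⟨rfl, rfl, hw⟩
        exact ⟨rfl, hw⟩
      · rintro ⟨h, hw⟩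
        injection h with h1 h2
        exact ⟨h1, h2, hw⟩

-- a pattern starting with a letter not occurring in `a` is an infix of `a ++ y` iff it is an infix of `y`
lemma head_cross {α : Type} (h : α) (r a y : List α) (ha : h ∉ a) :
    h :: r <:+: a ++ y ↔ h :: r <:+: y := by
  induction a with
  | nil => simp
  | cons b a ih =>
    have hba : h ∉ a := fun hm => ha (List.mem_cons_of_mem _ hm)
    rw [List.cons_append, List.infix_cons_iff]
    constructor
    · rintro (hp | hi)
      · rcases List.cons_prefix_cons.mp hp with ⟨rfl, -⟩
        exact absurd List.mem_cons_self ha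
      · exact (ih hba).mp hi
    · intro hy
      exact Or.inr ((ih hba).mpr hy)

-- the NUL-delimited text B searches, on the character-list side
def sjoin (parts : List (List Char)) : List Char :=
  '\x00' :: (PySem.Chars.join ['\x00'] parts ++ ['\x00'])

lemma sjoin_cons_cons (a b : List Char) (L : List (List Char)) :
    sjoin (a :: b :: L) = '\x00' :: (a ++ sjoin (b :: L)) := by
  simp [sjoin, PySem.Chars.join_cons_cons]

-- a NUL-free nonempty pattern occurs in a NUL-join iff it occurs in some part
lemma join_char (p : List Char) (hps : '\x00' ∉ p) (parts : List (List Char)) :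
    p <:+: PySem.Chars.join ['\x00'] parts ↔ (p <:+: ([] : List Char)) ∨ ∃ x ∈ parts, p <:+: x := by
  induction parts with
  | nil => simp [PySem.Chars.join_nil]
  | cons a L ih =>
    cases L with
    | nil =>
      rw [PySem.Chars.join_singleton]
      simp only [List.exists_mem_cons_iff]
      constructor
      · intro h; exact Or.inr (Or.inl h)
      · rintro (h | h | ⟨x, hx, -⟩)
        · exact (List.infix_nil.mp h) ▸ List.nil_infix
        · exact h
        · exact absurd hx (List.not_mem_nil)
    | cons b L' =>
      rw [PySem.Chars.join_cons_cons, List.append_assoc, List.singleton_append,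
        infix_cross _ p _ _ hps, ih]
      simp only [List.exists_mem_cons_iff]
      tauto

-- a NUL-free nonempty pattern occurs in the joined text iff it occurs in some part
lemma sub_char (p : List Char) (hp : p ≠ []) (hps : '\x00' ∉ p) (parts : List (List Char)) :
    p <:+: sjoin parts ↔ ∃ x ∈ parts, p <:+: x := by
  have hnil : ¬ p <:+: ([] : List Char) := fun h => hp (List.infix_nil.mp h)
  rw [show sjoin parts = [] ++ '\x00' :: (PySem.Chars.join ['\x00'] parts ++ '\x00' :: []) from rfl,
    infix_cross _ p _ _ hps, infix_cross _ p _ _ hps, or_iff_right hnil, or_iff_left hnil,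
    join_char p hps, or_iff_right hnil]

-- a NUL-wrapped NUL-free nonempty pattern occurs in the joined text iff some part equals it
lemma eq_char (q : List Char) (hq : q ≠ []) (hqs : '\x00' ∉ q) :
    ∀ (parts : List (List Char)), (∀ x ∈ parts, '\x00' ∉ x) →
      ('\x00' :: (q ++ ['\x00']) <:+: sjoin parts ↔ ∃ x ∈ parts, x = q) := by
  intro parts
  induction parts with
  | nil =>
    intro _
    constructor
    · intro h
      have hlen := h.length_le
      simp only [sjoin, PySem.Chars.join_nil, List.nil_append, List.length_cons,
        List.length_append, List.length_nil] at hlen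
      have : q.length = 0 := by omega
      exact absurd (List.length_eq_zero_iff.mp this) hq
    · rintro ⟨x, hx, -⟩
      exact absurd hx (List.not_mem_nil)
  | cons a L ih =>
    intro hp
    have haN : '\x00' ∉ a := hp a List.mem_cons_self
    cases L with
    | nil =>
      have hsj : sjoin [a] = '\x00' :: (a ++ ['\x00']) := by
        simp [sjoin, PySem.Chars.join_singleton]
      rw [hsj, List.infix_cons_iff]
      constructor
      · rintro (hpre | hi)
        · rcases List.cons_prefix_cons.mp hpre with ⟨-, hpre⟩
          rw [show a ++ ['\x00'] = a ++ '\x00' :: [] from rfl,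
            show q ++ ['\x00'] = q ++ '\x00' :: [] from rfl,
            eq_prefix_cross _ q a [] [] hqs haN] at hpre
          exact ⟨a, List.mem_cons_self, hpre.1.symm⟩
        · rw [show a ++ ['\x00'] = a ++ '\x00' :: [] from rfl,
            head_cross _ _ a _ haN] at hi
          have hlen := hi.length_le
          simp only [List.length_cons, List.length_append, List.length_nil] at hlen
          omega
      · rintro ⟨x, hx, rfl⟩
        obtain rfl := List.mem_singleton.mp hx
        exact Or.inl List.prefix_rfl
    | cons b L' =>
      have hL : ∀ x ∈ b :: L', '\x00' ∉ x := fun x hx => hp x (List.mem_cons_of_mem _ hx)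
      have hsj : sjoin (b :: L') = '\x00' :: (PySem.Chars.join ['\x00'] (b :: L') ++ ['\x00']) := rfl
      rw [sjoin_cons_cons, List.infix_cons_iff]
      constructor
      · rintro (hpre | hi)
        · rcases List.cons_prefix_cons.mp hpre with ⟨-, hpre⟩
          rw [show a ++ sjoin (b :: L') = a ++ '\x00' :: (PySem.Chars.join ['\x00'] (b :: L') ++ ['\x00']) from by rw [hsj],
            show q ++ ['\x00'] = q ++ '\x00' :: [] from rfl,
            eq_prefix_cross _ q a [] _ hqs haN] at hpre
          exact ⟨a, List.mem_cons_self, hpre.1.symm⟩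
        · rw [head_cross _ _ a _ haN] at hi
          rcases (ih hL).mp hi with ⟨x, hx, rfl⟩
          exact ⟨x, List.mem_cons_of_mem _ hx, rfl⟩
      · rintro ⟨x, hx, rfl⟩
        rcases List.mem_cons.mp hx with rfl | hx'
        · refine Or.inl (List.cons_prefix_cons.mpr ⟨rfl, ?_⟩)
          rw [show x ++ sjoin (b :: L') = x ++ '\x00' :: (PySem.Chars.join ['\x00'] (b :: L') ++ ['\x00']) from by rw [hsj],
            show x ++ ['\x00'] = x ++ '\x00' :: [] from rfl,
            eq_prefix_cross _ x x [] _ hqs hqs]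
          exact ⟨rfl, List.nil_prefix⟩
        · refine Or.inr ?_
          rw [head_cross _ _ a _ haN]
          exact (ih hL).mpr ⟨x, hx', rfl⟩

-- lowering a domain character never produces NUL
lemma lowerChar_ne_nul (c : Char) (hc : pvDomChar c = true) :
    PySem.Chars.lowerChar c ≠ '\x00' := by
  intro h
  have hval : (PySem.Chars.lowerChar c).toNat = 0 := by rw [h]; rfl
  unfold pvDomChar at hc
  simp only [Bool.or_eq_true, Bool.and_eq_true, decide_eq_true_eq, beq_iff_eq] at hc
  rw [show PySem.Chars.lowerChar c = if PySem.Chars.isupper c = true then Char.ofNat (c.toNat + 32) else c from rfl] at hval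
  split_ifs at hval with hup
  · unfold PySem.Chars.isupper at hup
    simp only [Bool.and_eq_true, decide_eq_true_eq] at hup
    have hle : c.toNat ≤ 90 := by
      have h2 := hup.2
      rw [Char.le_def] at h2
      exact UInt32.le_iff_toNat_le.mp h2
    have hvalid : (c.toNat + 32).isValidChar := Or.inl (by omega)
    rw [Char.toNat_ofNat, if_pos hvalid] at hval
    omega
  · omega

-- the text B builds, as a character list, is `sjoin` of the lowered arguments
lemma text_toList (cmdline : List String) :
    ("\x00" ++ PySem.Str.join "\x00" (cmdline.map (fun arg => PySem.Str.lower arg)) ++ "\x00").toList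
      = sjoin ((cmdline.map (fun arg => PySem.Str.lower arg)).map String.toList) := by
  simp [sjoin, PySem.Str.toList_join]

lemma ite_chain (t1 t2 t3 : Bool) :
    (if t1 = true then true else if t2 = true then true else if t3 = true then true else false)
      = (t1 || t2 || t3) := by
  cases t1 <;> cases t2 <;> cases t3 <;> rfl

-- A's value as three existential scans over the lowered arguments
lemma A_iff (cmdline : List String) :
    is_overlay_cmdline_py cmdline = true ↔
      (∃ s ∈ cmdline, PySem.Str.isIn "overlay_process.py" (PySem.Str.lower s) = true) ∨
      (∃ s ∈ cmdline, PySem.Str.lower s = "--overlay") ∨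
      (∃ s ∈ cmdline, PySem.Str.lower s = "--autostart") := by
  cases cmdline with
  | nil => simp [is_overlay_cmdline_py]
  | cons a rest =>
    unfold is_overlay_cmdline_py
    rw [if_neg (by simp)]
    rw [ite_chain]
    simp only [Bool.or_eq_true, List.any_map, List.any_eq_true, Function.comp,
      List.contains_eq_any_beq, beq_iff_eq]
    constructor
    · rintro ((⟨s, hs, h⟩ | ⟨s, hs, h⟩) | ⟨s, hs, h⟩)
      · exact Or.inl ⟨s, hs, h⟩
      · exact Or.inr (Or.inl ⟨s, hs, h.symm⟩)
      · exact Or.inr (Or.inr ⟨s, hs, h.symm⟩)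
    · rintro (⟨s, hs, h⟩ | ⟨s, hs, h⟩ | ⟨s, hs, h⟩)
      · exact Or.inl (Or.inl ⟨s, hs, h⟩)
      · exact Or.inl (Or.inr ⟨s, hs, h.symm⟩)
      · exact Or.inr ⟨s, hs, h.symm⟩

-- B's value as the same three scans, given that no lowered argument contains NUL
lemma B_iff (cmdline : List String)
    (hnul : ∀ x ∈ (cmdline.map (fun arg => PySem.Str.lower arg)).map String.toList, '\x00' ∉ x) :
    is_overlay_cmdline_py_alt cmdline = true ↔
      (∃ s ∈ cmdline, PySem.Str.isIn "overlay_process.py" (PySem.Str.lower s) = true) ∨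
      (∃ s ∈ cmdline, PySem.Str.lower s = "--overlay") ∨
      (∃ s ∈ cmdline, PySem.Str.lower s = "--autostart") := by
  unfold is_overlay_cmdline_py_alt
  simp only [Bool.or_eq_true]
  rw [PySem.Str.isIn_iff_infix, PySem.Str.isIn_iff_infix, PySem.Str.isIn_iff_infix, text_toList,
    sub_char "overlay_process.py".toList (by decide) (by decide),
    show ("\x00--overlay\x00" : String).toList = '\x00' :: ("--overlay".toList ++ ['\x00']) from by decide,
    show ("\x00--autostart\x00" : String).toList = '\x00' :: ("--autostart".toList ++ ['\x00']) from by decide,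
    eq_char "--overlay".toList (by decide) (by decide) _ hnul,
    eq_char "--autostart".toList (by decide) (by decide) _ hnul]
  simp only [List.mem_map, exists_exists_and_eq_and]
  constructor
  · rintro ((⟨s, hs, h⟩ | ⟨s, hs, h⟩) | ⟨s, hs, h⟩)
    · exact Or.inl ⟨s, hs, (PySem.Str.isIn_iff_infix _ _).mpr h⟩
    · exact Or.inr (Or.inl ⟨s, hs, String.ext h⟩)
    · exact Or.inr (Or.inr ⟨s, hs, String.ext h⟩)
  · rintro (⟨s, hs, h⟩ | ⟨s, hs, h⟩ | ⟨s, hs, h⟩)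
    · exact Or.inl (Or.inl ⟨s, hs, (PySem.Str.isIn_iff_infix _ _).mp h⟩)
    · exact Or.inl (Or.inr ⟨s, hs, by rw [h]⟩)
    · exact Or.inr ⟨s, hs, by rw [h]⟩

-- ===== VERDICT (by name: the statement is the Claim_ definition above) =====
theorem is_overlay_cmdline_py_spec : Claim_equal_is_overlay_cmdline_py := by
  intro cmdline hdom
  unfold Spec_is_overlay_cmdline_py
  have hnul : ∀ x ∈ (cmdline.map (fun arg => PySem.Str.lower arg)).map String.toList, '\x00' ∉ x := by
    intro x hx hmem
    simp only [List.mem_map] at hx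
    rcases hx with ⟨s, ⟨arg, harg, rfl⟩, rfl⟩
    rw [PySem.Str.toList_lower] at hmem
    rw [show PySem.Chars.lower = List.map PySem.Chars.lowerChar from rfl, List.mem_map] at hmem
    rcases hmem with ⟨c, hc, hceq⟩
    unfold Dom_is_overlay_cmdline_py at hdom
    rw [List.all_eq_true] at hdom
    have hstr := hdom arg harg
    unfold pvDomStr at hstr
    rw [List.all_eq_true] at hstr
    exact lowerChar_ne_nul c (hstr c hc) hceq
  rw [Bool.eq_iff_iff, A_iff, B_iff cmdline hnul]
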